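-- pv_equiv track=rewrite | github.com/amrakm/BechdalTest | IMSDB_Parser.py | dialog_from_scene
-- ===== SOURCE A (Python) =====
-- from collections import defaultdict, Counter
--
-- def dialog_from_scene(scene):
--     '''
--     Extract dialog text from scene plain text
--     This is done by finding the two most frequent indentations, then select only the second largest indenation
--
--     Parameters:
--     ----------
--     scene: list
--         list of lines in the scene
--
--     Returns:
--     -------
--     string: extracted dialog as a single string
--
--     '''
--
--     non_titles = [line for line in  scene if not line.lstrip()[:2].isupper() and len(line.strip()) != 0]
--
--     if non_titles:
--
--         most_freq_indentations = sorted(Counter([len(line) - len(line.lstrip()) for line in non_titles]).items(), key=lambda x:-x[0])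
--         dialog_indentation = most_freq_indentations[-2:][0][0]
--         return " ".join([line.strip() for line in non_titles if len(line) - len(line.lstrip()) == dialog_indentation])
--     else:
--         return ""
-- ===== SOURCE B (Python) =====
-- def dialog_from_scene(scene):
--     '''Extract dialog text: lines at the second-smallest distinct indentation
--     (falling back to the smallest when only one indentation occurs).
--     Single min-scans instead of Counter + sort.'''
--
--     non_titles = [line for line in scene if not line.lstrip()[:2].isupper() and len(line.strip()) != 0]
--
--     if not non_titles:
--         return ""
--
--     widths = [len(line) - len(line.lstrip()) for line in non_titles]
--     m1 = min(widths)
--     bigger = [d for d in widths if d > m1]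
--     target = min(bigger) if bigger else m1
--     return " ".join(line.strip() for line in non_titles if len(line) - len(line.lstrip()) == target)
-- ===== Notes on version B (the rewrite author's own statement) =====
-- stated objective: simpler
-- what changed: B replaces the Counter + descending sort + [-2:][0] slice selection with two direct min-scans: the smallest indentation width and the smallest width strictly above it (falling back to the smallest when all widths are equal), then joins the stripped lines at that width.
import Mathlib
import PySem

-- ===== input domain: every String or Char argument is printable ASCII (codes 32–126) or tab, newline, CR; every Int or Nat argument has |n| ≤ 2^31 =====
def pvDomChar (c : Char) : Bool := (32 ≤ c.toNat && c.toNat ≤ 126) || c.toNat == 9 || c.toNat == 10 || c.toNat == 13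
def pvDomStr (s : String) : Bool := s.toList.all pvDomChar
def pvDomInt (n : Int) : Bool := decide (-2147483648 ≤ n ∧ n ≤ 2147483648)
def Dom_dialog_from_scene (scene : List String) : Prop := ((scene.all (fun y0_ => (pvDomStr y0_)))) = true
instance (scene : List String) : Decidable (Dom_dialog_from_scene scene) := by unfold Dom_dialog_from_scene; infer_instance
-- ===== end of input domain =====

-- B replaces the Counter + descending sort + slice selection of the second-smallest
-- distinct indentation by two direct min-scans (objective: simpler).

-- ===== PORT A =====
-- str.isupper() on a list of chars; exact on the printable-ASCII domain
-- (at least one cased character, and no lowercase one)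
def pvIsupper (cs : List Char) : Bool :=
  cs.any (fun c => PySem.Chars.isupper c || PySem.Chars.islower c) &&
  cs.all (fun c => !PySem.Chars.islower c)

-- the non_titles filter predicate (identical in both Pythons):
-- not line.lstrip()[:2].isupper() and len(line.strip()) != 0
def pvKeep (line : String) : Bool :=
  !(pvIsupper (PySem.Chars.slice (PySem.Chars.lstrip line.toList) none (some 2))) &&
  !((PySem.Chars.strip line.toList).length == 0)

-- len(line) - len(line.lstrip())  (identical in both Pythons)
def pvWidth (line : String) : Int :=
  (line.toList.length : Int) - ((PySem.Chars.lstrip line.toList).length : Int)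

-- A's selection of dialog_indentation:
-- sorted(Counter(widths).items(), key=lambda x: -x[0])[-2:][0][0]
-- (.headD default is unreachable: the list is nonempty whenever widths is)
def pvIndentA (ws : List Int) : Int :=
  ((PySem.List.slice (PySem.List.sorted (PySem.Dict.counter ws).items (fun x => -x.1) false)
      (some (-2)) none).headD (0, 0)).1

def dialog_from_scene (scene : List String) : String :=
  let non_titles := scene.filter pvKeep
  if non_titles.isEmpty then ""
  else
    let di := pvIndentA (non_titles.map pvWidth)
    PySem.Str.join " "
      ((non_titles.filter (fun l => pvWidth l == di)).map (fun l => PySem.Str.strip l))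

-- ===== PORT B =====
-- B's selection: m1 = min(widths); bigger = [d for d in widths if d > m1];
-- target = min(bigger) if bigger else m1   (.getD 0 unreachable: the lists are nonempty)
def pvIndentB (ws : List Int) : Int :=
  let m1 := (PySem.List.min? ws (fun x => x)).getD 0
  let bigger := ws.filter (fun d => m1 < d)
  if bigger.isEmpty then m1 else (PySem.List.min? bigger (fun x => x)).getD 0

def dialog_from_scene_alt (scene : List String) : String :=
  let non_titles := scene.filter pvKeep
  if non_titles.isEmpty then ""
  else
    let target := pvIndentB (non_titles.map pvWidth)
    PySem.Str.join " "
      ((non_titles.filter (fun l => pvWidth l == target)).map (fun l => PySem.Str.strip l))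

-- ===== PRECONDITION & SPEC =====
def Spec_dialog_from_scene (scene : List String) (out : String) : Prop := out = dialog_from_scene_alt scene
instance (scene : List String) (out : String) : Decidable (Spec_dialog_from_scene scene out) := by unfold Spec_dialog_from_scene; infer_instance

-- ===== CLAIM (what is proved, stated in full; the proofs are below) =====
def Claim_equal_dialog_from_scene : Prop := ∀ (scene : List String), Dom_dialog_from_scene scene → Spec_dialog_from_scene scene (dialog_from_scene scene)

-- ===== LEMMAS AND PROOFS =====

theorem pvIndent_eq (ws : List Int) (hws : ws ≠ []) : pvIndentA ws = pvIndentB ws := by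
  set S := PySem.List.sorted (PySem.Dict.counter ws).items (fun x => -x.1) false with hS
  have hperm : S.Perm (PySem.Dict.counter ws).items := PySem.List.sorted_perm _ _ _
  have hLperm : (S.map Prod.fst).Perm (PySem.Set.ofList ws) := by
    have := hperm.map Prod.fst
    rwa [PySem.Dict.items_counter, List.map_map, show (Prod.fst ∘ fun k => (k, ((ws.count k : Int)))) = id from rfl, List.map_id] at this
  have hmem : ∀ x, x ∈ S.map Prod.fst ↔ x ∈ ws := by
    intro x; rw [hLperm.mem_iff, PySem.Set.mem_ofList]
  have hnodup : (S.map Prod.fst).Nodup := hLperm.nodup_iff.mpr (PySem.Set.nodup_ofList ws)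
  have hpw : S.Pairwise (fun a b => -a.1 ≤ -b.1) := PySem.List.sorted_pairwise _ _
  have hne : S.Pairwise (fun a b => a.1 ≠ b.1) := (List.pairwise_map.mp hnodup)
  have hgt : ∀ i j (_ : i < S.length) (_ : j < S.length), i < j → S[j].1 < S[i].1 := by
    have := List.pairwise_iff_getElem.mp (hpw.and hne)
    intro i j hi hj hij
    have h := this i j hi hj hij
    omega
  have hn : 0 < S.length := by
    rcases List.exists_mem_of_ne_nil ws hws with ⟨x, hx⟩
    have : x ∈ S.map Prod.fst := (hmem x).mpr hx
    rcases List.mem_map.mp this with ⟨p, hp, _⟩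
    exact List.length_pos_of_mem hp
  -- index of any ws element
  have hidx : ∀ x ∈ ws, ∃ i, ∃ h : i < S.length, S[i].1 = x := by
    intro x hx
    rcases List.mem_map.mp ((hmem x).mpr hx) with ⟨p, hp, hpx⟩
    rcases List.mem_iff_getElem.mp hp with ⟨i, hi, hip⟩
    exact ⟨i, hi, by rw [hip, hpx]⟩
  have hSmem : ∀ i (h : i < S.length), S[i].1 ∈ ws := by
    intro i h
    exact (hmem _).mp (List.mem_map.mpr ⟨S[i], List.getElem_mem h, rfl⟩)
  set n := S.length with hnn
  set m := (S[n-1]'(by omega)).1 with hm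
  have hm_mem : m ∈ ws := hSmem _ _
  have hmin : ∀ x ∈ ws, m ≤ x := by
    intro x hx
    rcases hidx x hx with ⟨i, hi, hix⟩
    rcases Nat.lt_or_ge i (n-1) with h | h
    · have := hgt i (n-1) hi (by omega) h; omega
    · have : i = n - 1 := by omega
      subst this; omega
  have hm1 : (PySem.List.min? ws (fun x => x)).getD 0 = m := by
    rcases ho : PySem.List.min? ws (fun x => x) with _ | v
    · exact absurd ((PySem.List.min?_eq_none_iff ws _).mp ho) hws
    · have h1 : m ≤ v := hmin v (PySem.List.min?_mem ho)
      have h2 : v ≤ m := PySem.List.min?_isMin ho m hm_mem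
      simp [Option.getD]; omega
  -- A's value
  have hA : pvIndentA ws = (S[n-2]'(by omega)).1 := by
    unfold pvIndentA
    rw [← hS, PySem.List.slice_from_neg_ofNat S 2 (by norm_num),
        List.headD_eq_head?_getD, List.head?_drop]
    rw [List.getElem?_eq_getElem (by omega)]
    rfl
  unfold pvIndentB
  simp only [hm1]
  rcases Nat.lt_or_ge n 2 with h2 | h2
  · -- n = 1 : every width equals m
    have hone : n = 1 := by omega
    have hall : ∀ x ∈ ws, x = m := by
      intro x hx
      rcases hidx x hx with ⟨i, hi, hix⟩
      have hi0 : i = n - 1 := by omega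
      subst hi0
      rw [← hix, hm]
    have hfe : ws.filter (fun d => decide (m < d)) = [] := by
      apply List.filter_eq_nil_iff.mpr
      intro x hx
      have := hall x hx
      simp [this]
    simp only [hfe, List.isEmpty_nil, if_true]
    rw [hA]
    simp only [show n - 2 = n - 1 from by omega]
    exact hm.symm
  · -- n ≥ 2
    set a := (S[n-2]'(by omega)).1 with ha
    have hma : m < a := by
      have := hgt (n-2) (n-1) (by omega) (by omega) (by omega)
      omega
    have ha_big : a ∈ ws.filter (fun d => decide (m < d)) :=
      List.mem_filter.mpr ⟨hSmem _ _, by simpa using hma⟩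
    have hbne : ws.filter (fun d => decide (m < d)) ≠ [] := by
      intro h0; rw [h0] at ha_big; simp at ha_big
    have hie : (ws.filter (fun d => decide (m < d))).isEmpty = false := by
      simpa [List.isEmpty_iff] using hbne
    simp only [hie, if_false, Bool.false_eq_true]
    rw [hA]
    rcases ho : PySem.List.min? (ws.filter (fun d => decide (m < d))) (fun x => x) with _ | u
    · exact absurd ((PySem.List.min?_eq_none_iff _ _).mp ho) hbne
    · have hu_mem := PySem.List.min?_mem ho
      have hu_ws : u ∈ ws := (List.mem_filter.mp hu_mem).1
      have hu_gt : m < u := by have := (List.mem_filter.mp hu_mem).2; simpa using this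
      have h1 : u ≤ a := PySem.List.min?_isMin ho a ha_big
      have h2 : a ≤ u := by
        rcases hidx u hu_ws with ⟨i, hi, hiu⟩
        have hine : i ≠ n - 1 := by
          intro h; subst h; omega
        rcases Nat.lt_or_ge i (n-2) with h | h
        · have := hgt i (n-2) hi (by omega) h; omega
        · have : i = n - 2 := by omega
          subst this; omega
      simp [Option.getD]; omega

theorem dialog_eq (scene : List String) :
    dialog_from_scene scene = dialog_from_scene_alt scene := by
  unfold dialog_from_scene dialog_from_scene_alt
  by_cases h : (scene.filter pvKeep).isEmpty
  · simp [h]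
  · have hne : scene.filter pvKeep ≠ [] := by
      intro h0; rw [h0] at h; simp at h
    have : (scene.filter pvKeep).map pvWidth ≠ [] := by
      simpa using hne
    simp only [h, if_false, Bool.false_eq_true]
    rw [pvIndent_eq _ this]

-- ===== VERDICT (by name: the statement is the Claim_ definition above) =====
theorem dialog_from_scene_spec : Claim_equal_dialog_from_scene := by
  intro scene _
  unfold Spec_dialog_from_scene
  exact dialog_eq scene
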